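-- pv_equiv track=rewrite | github.com/Neeeraj27/strees_dost_web_system | app/services/question_generator.py | _generate_fallback_counter_questions
-- ===== SOURCE A (Python) =====
-- def _generate_fallback_counter_questions(user_text: str) -> list[str]:
--     """Rule-based fallback for counter-questions."""
--     text = user_text.lower()
--     questions = []
--
--     # Detect patterns and generate appropriate counter-questions
--     if any(word in text for word in ["hate", "can't stand", "despise"]):
--         target = _extract_target(user_text)
--         questions.extend([
--             f"If you truly hated {target}, why haven't you cut them off completely?",
--             f"Can you think of even one good moment with {target} - does that fit with 'hate'?",
--             f"Is it actual hate, or disappointment that {target} didn't meet your expectations?",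
--         ])
--
--     elif any(word in text for word in ["can't", "cannot", "unable", "impossible"]):
--         questions.extend([
--             "Is it truly 'can't', or is it 'won't' because it's uncomfortable?",
--             "What would change if you admitted you're choosing not to, rather than unable to?",
--             "If someone offered you ₹10 lakh to do it, would 'can't' suddenly become 'can'?",
--         ])
--
--     elif any(word in text for word in ["stressed", "stress", "anxious", "anxiety"]):
--         questions.extend([
--             "If the thing stressing you disappeared tomorrow, would you feel peace or just find something new to stress about?",
--             "Is the stress about the situation, or about what failure would say about you?",
--             "What's the actual worst-case scenario - and have you prepared for it at all?",
--         ])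
--
--     elif any(word in text for word in ["distracted", "focus", "concentrate"]):
--         questions.extend([
--             "Do you lose focus on everything, or just on things you find boring?",
--             "If your favorite game required the same focus as studying, would you still have this problem?",
--             "Is it a focus problem, or a motivation problem you're calling 'focus'?",
--         ])
--
--     elif any(word in text for word in ["lazy", "procrastinat"]):
--         questions.extend([
--             "Are you lazy about everything, or just things that don't excite you?",
--             "What would it mean if 'lazy' was actually 'scared of not being good enough'?",
--             "If laziness is the problem, why do you have energy for things you enjoy?",
--         ])
--
--     elif any(word in text for word in ["don't understand", "doesn't understand", "no one understands"]):
--         questions.extend([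
--             "Have you explained yourself in their language, or just expected them to decode yours?",
--             "Is it that they don't understand, or that they understand but disagree?",
--             "What if they understand perfectly but just don't give you the response you want?",
--         ])
--
--     elif any(word in text for word in ["pressure", "expect", "expectation"]):
--         questions.extend([
--             "Is the pressure from them, or from your own fear of disappointing them?",
--             "If they expected nothing from you, would that feel like freedom or abandonment?",
--             "What would happen if you just... didn't meet their expectations?",
--         ])
--
--     elif any(word in text for word in ["fail", "failing", "failure"]):
--         questions.extend([
--             "Is failing the actual fear, or is it what people will think of you after?",
--             "If no one ever found out about the failure, would it still hurt as much?",
--             "What's one thing you've failed at before that turned out fine eventually?",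
--         ])
--
--     elif any(word in text for word in ["friend", "friends"]):
--         questions.extend([
--             "Are they actually bad friends, or just not the friends you wish they were?",
--             "What would you lose if you stopped being their friend tomorrow?",
--             "Is the problem them, or that you keep choosing the same type of people?",
--         ])
--
--     # Generic fallback
--     if not questions:
--         questions = [
--             "What would it mean if the opposite of what you just said was actually true?",
--             "Are you describing the situation accurately, or how it feels in this moment?",
--             "What are you avoiding admitting to yourself right now?",
--         ]
--
--     return questions
--
-- def _extract_target(text: str) -> str:
--     """Extract the target of emotion from text (friends, parents, etc.)."""
--     text_lower = text.lower()
--     if "friend" in text_lower: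
--         return "them"
--     if "parent" in text_lower or "mom" in text_lower or "dad" in text_lower:
--         return "them"
--     if "teacher" in text_lower:
--         return "them"
--     if "myself" in text_lower or "i " in text_lower:
--         return "yourself"
--     return "them"
-- ===== SOURCE B (Python) =====
-- # Flat keyword->rule-id index with a running-minimum priority scan, instead of
-- # A's nine-branch elif chain: every keyword is checked, the smallest matched
-- # rule id wins, and a rule-id dict supplies the questions.
--
-- _KEYWORD_RULE = {
--     "hate": 0, "can't stand": 0, "despise": 0,
--     "can't": 1, "cannot": 1, "unable": 1, "impossible": 1,
--     "stressed": 2, "stress": 2, "anxious": 2, "anxiety": 2,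
--     "distracted": 3, "focus": 3, "concentrate": 3,
--     "lazy": 4, "procrastinat": 4,
--     "don't understand": 5, "doesn't understand": 5, "no one understands": 5,
--     "pressure": 6, "expect": 6, "expectation": 6,
--     "fail": 7, "failing": 7, "failure": 7,
--     "friend": 8, "friends": 8,
-- }
--
-- _RULE_QUESTIONS = {
--     1: [
--         "Is it truly 'can't', or is it 'won't' because it's uncomfortable?",
--         "What would change if you admitted you're choosing not to, rather than unable to?",
--         "If someone offered you ₹10 lakh to do it, would 'can't' suddenly become 'can'?",
--     ],
--     2: [
--         "If the thing stressing you disappeared tomorrow, would you feel peace or just find something new to stress about?",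
--         "Is the stress about the situation, or about what failure would say about you?",
--         "What's the actual worst-case scenario - and have you prepared for it at all?",
--     ],
--     3: [
--         "Do you lose focus on everything, or just on things you find boring?",
--         "If your favorite game required the same focus as studying, would you still have this problem?",
--         "Is it a focus problem, or a motivation problem you're calling 'focus'?",
--     ],
--     4: [
--         "Are you lazy about everything, or just things that don't excite you?",
--         "What would it mean if 'lazy' was actually 'scared of not being good enough'?",
--         "If laziness is the problem, why do you have energy for things you enjoy?",
--     ],
--     5: [
--         "Have you explained yourself in their language, or just expected them to decode yours?",
--         "Is it that they don't understand, or that they understand but disagree?",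
--         "What if they understand perfectly but just don't give you the response you want?",
--     ],
--     6: [
--         "Is the pressure from them, or from your own fear of disappointing them?",
--         "If they expected nothing from you, would that feel like freedom or abandonment?",
--         "What would happen if you just... didn't meet their expectations?",
--     ],
--     7: [
--         "Is failing the actual fear, or is it what people will think of you after?",
--         "If no one ever found out about the failure, would it still hurt as much?",
--         "What's one thing you've failed at before that turned out fine eventually?",
--     ],
--     8: [
--         "Are they actually bad friends, or just not the friends you wish they were?",
--         "What would you lose if you stopped being their friend tomorrow?",
--         "Is the problem them, or that you keep choosing the same type of people?",
--     ],
-- }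
--
-- _GENERIC = [
--     "What would it mean if the opposite of what you just said was actually true?",
--     "Are you describing the situation accurately, or how it feels in this moment?",
--     "What are you avoiding admitting to yourself right now?",
-- ]
--
--
-- def _extract_target(text: str) -> str:
--     tl = text.lower()
--     if ("myself" in tl or "i " in tl) and not any(
--         w in tl for w in ("friend", "parent", "mom", "dad", "teacher")
--     ):
--         return "yourself"
--     return "them"
--
--
-- def _generate_fallback_counter_questions(user_text: str) -> list[str]:
--     text = user_text.lower()
--     best = 9
--     for kw, rid in _KEYWORD_RULE.items():
--         if rid < best and kw in text:
--             best = rid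
--     if best == 0:
--         t = _extract_target(user_text)
--         return [
--             f"If you truly hated {t}, why haven't you cut them off completely?",
--             f"Can you think of even one good moment with {t} - does that fit with 'hate'?",
--             f"Is it actual hate, or disappointment that {t} didn't meet your expectations?",
--         ]
--     qs = _RULE_QUESTIONS.get(best)
--     return qs if qs is not None else _GENERIC
-- ===== Notes on version B (the rewrite author's own statement) =====
-- stated objective: alternative
-- what changed: Replaced the nine-branch short-circuiting elif chain by a flat keyword->rule-id index scanned completely with a running minimum (smallest matched rule id wins), a rule-id dict lookup for the questions, and a single-expression _extract_target instead of its five-way if chain.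
import Mathlib
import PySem

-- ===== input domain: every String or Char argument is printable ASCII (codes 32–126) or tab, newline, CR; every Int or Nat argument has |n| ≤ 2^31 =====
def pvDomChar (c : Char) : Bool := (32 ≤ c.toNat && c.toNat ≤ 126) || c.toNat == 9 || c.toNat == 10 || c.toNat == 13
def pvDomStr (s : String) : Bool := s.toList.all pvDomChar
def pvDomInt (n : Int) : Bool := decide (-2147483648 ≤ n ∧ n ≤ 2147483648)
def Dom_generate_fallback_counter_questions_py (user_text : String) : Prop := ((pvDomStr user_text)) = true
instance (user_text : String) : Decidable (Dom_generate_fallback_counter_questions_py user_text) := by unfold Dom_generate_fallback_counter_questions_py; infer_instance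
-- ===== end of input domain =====

-- B replaces A's elif chain by a flat keyword->rule-id index scanned with a running minimum; same behaviour, no speed claim.

-- ===== PORT A =====
-- helper _extract_target, A's version: a five-way if chain
def extract_target_py (text : String) : String :=
  let text_lower := PySem.Str.lower text
  if PySem.Str.isIn "friend" text_lower then "them"
  else if PySem.Str.isIn "parent" text_lower || PySem.Str.isIn "mom" text_lower || PySem.Str.isIn "dad" text_lower then "them"
  else if PySem.Str.isIn "teacher" text_lower then "them"
  else if PySem.Str.isIn "myself" text_lower || PySem.Str.isIn "i " text_lower then "yourself"
  else "them"

def generate_fallback_counter_questions_py (user_text : String) : List String :=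
  let text := PySem.Str.lower user_text
  let questions : List String :=
    if (["hate", "can't stand", "despise"].any (fun w => PySem.Str.isIn w text)) then
      let target := extract_target_py user_text
      [ "If you truly hated " ++ target ++ ", why haven't you cut them off completely?",
        "Can you think of even one good moment with " ++ target ++ " - does that fit with 'hate'?",
        "Is it actual hate, or disappointment that " ++ target ++ " didn't meet your expectations?" ]
    else if (["can't", "cannot", "unable", "impossible"].any (fun w => PySem.Str.isIn w text)) then
      [ "Is it truly 'can't', or is it 'won't' because it's uncomfortable?",
        "What would change if you admitted you're choosing not to, rather than unable to?",
        "If someone offered you ₹10 lakh to do it, would 'can't' suddenly become 'can'?" ]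
    else if (["stressed", "stress", "anxious", "anxiety"].any (fun w => PySem.Str.isIn w text)) then
      [ "If the thing stressing you disappeared tomorrow, would you feel peace or just find something new to stress about?",
        "Is the stress about the situation, or about what failure would say about you?",
        "What's the actual worst-case scenario - and have you prepared for it at all?" ]
    else if (["distracted", "focus", "concentrate"].any (fun w => PySem.Str.isIn w text)) then
      [ "Do you lose focus on everything, or just on things you find boring?",
        "If your favorite game required the same focus as studying, would you still have this problem?",
        "Is it a focus problem, or a motivation problem you're calling 'focus'?" ]
    else if (["lazy", "procrastinat"].any (fun w => PySem.Str.isIn w text)) then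
      [ "Are you lazy about everything, or just things that don't excite you?",
        "What would it mean if 'lazy' was actually 'scared of not being good enough'?",
        "If laziness is the problem, why do you have energy for things you enjoy?" ]
    else if (["don't understand", "doesn't understand", "no one understands"].any (fun w => PySem.Str.isIn w text)) then
      [ "Have you explained yourself in their language, or just expected them to decode yours?",
        "Is it that they don't understand, or that they understand but disagree?",
        "What if they understand perfectly but just don't give you the response you want?" ]
    else if (["pressure", "expect", "expectation"].any (fun w => PySem.Str.isIn w text)) then
      [ "Is the pressure from them, or from your own fear of disappointing them?",
        "If they expected nothing from you, would that feel like freedom or abandonment?",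
        "What would happen if you just... didn't meet their expectations?" ]
    else if (["fail", "failing", "failure"].any (fun w => PySem.Str.isIn w text)) then
      [ "Is failing the actual fear, or is it what people will think of you after?",
        "If no one ever found out about the failure, would it still hurt as much?",
        "What's one thing you've failed at before that turned out fine eventually?" ]
    else if (["friend", "friends"].any (fun w => PySem.Str.isIn w text)) then
      [ "Are they actually bad friends, or just not the friends you wish they were?",
        "What would you lose if you stopped being their friend tomorrow?",
        "Is the problem them, or that you keep choosing the same type of people?" ]
    else []
  if questions.isEmpty then
    [ "What would it mean if the opposite of what you just said was actually true?",
      "Are you describing the situation accurately, or how it feels in this moment?",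
      "What are you avoiding admitting to yourself right now?" ]
  else questions

-- ===== PORT B =====
-- B's flat keyword -> rule-id index (a dict in Source B, iterated in insertion order)
def pvKeywordRule : List (String × Nat) :=
  [ ("hate", 0), ("can't stand", 0), ("despise", 0),
    ("can't", 1), ("cannot", 1), ("unable", 1), ("impossible", 1),
    ("stressed", 2), ("stress", 2), ("anxious", 2), ("anxiety", 2),
    ("distracted", 3), ("focus", 3), ("concentrate", 3),
    ("lazy", 4), ("procrastinat", 4),
    ("don't understand", 5), ("doesn't understand", 5), ("no one understands", 5),
    ("pressure", 6), ("expect", 6), ("expectation", 6),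
    ("fail", 7), ("failing", 7), ("failure", 7),
    ("friend", 8), ("friends", 8) ]

-- B's rule-id -> questions dict
def pvRuleQuestions : PySem.Dict Nat (List String) := PySem.Dict.ofList
  [ (1, [ "Is it truly 'can't', or is it 'won't' because it's uncomfortable?",
          "What would change if you admitted you're choosing not to, rather than unable to?",
          "If someone offered you ₹10 lakh to do it, would 'can't' suddenly become 'can'?" ]),
    (2, [ "If the thing stressing you disappeared tomorrow, would you feel peace or just find something new to stress about?",
          "Is the stress about the situation, or about what failure would say about you?",
          "What's the actual worst-case scenario - and have you prepared for it at all?" ]),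
    (3, [ "Do you lose focus on everything, or just on things you find boring?",
          "If your favorite game required the same focus as studying, would you still have this problem?",
          "Is it a focus problem, or a motivation problem you're calling 'focus'?" ]),
    (4, [ "Are you lazy about everything, or just things that don't excite you?",
          "What would it mean if 'lazy' was actually 'scared of not being good enough'?",
          "If laziness is the problem, why do you have energy for things you enjoy?" ]),
    (5, [ "Have you explained yourself in their language, or just expected them to decode yours?",
          "Is it that they don't understand, or that they understand but disagree?",
          "What if they understand perfectly but just don't give you the response you want?" ]),
    (6, [ "Is the pressure from them, or from your own fear of disappointing them?",
          "If they expected nothing from you, would that feel like freedom or abandonment?",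
          "What would happen if you just... didn't meet their expectations?" ]),
    (7, [ "Is failing the actual fear, or is it what people will think of you after?",
          "If no one ever found out about the failure, would it still hurt as much?",
          "What's one thing you've failed at before that turned out fine eventually?" ]),
    (8, [ "Are they actually bad friends, or just not the friends you wish they were?",
          "What would you lose if you stopped being their friend tomorrow?",
          "Is the problem them, or that you keep choosing the same type of people?" ]) ]

def pvGenericB : List String :=
  [ "What would it mean if the opposite of what you just said was actually true?",
    "Are you describing the situation accurately, or how it feels in this moment?",
    "What are you avoiding admitting to yourself right now?" ]

-- B's _extract_target: a single guarded expression instead of a five-way chain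
def extract_target_alt (text : String) : String :=
  let tl := PySem.Str.lower text
  if (PySem.Str.isIn "myself" tl || PySem.Str.isIn "i " tl) &&
     !(["friend", "parent", "mom", "dad", "teacher"].any (fun w => PySem.Str.isIn w tl)) then
    "yourself"
  else "them"

-- Source B's running-minimum loop over the keyword index
def pvBestRule (text : String) : Nat :=
  pvKeywordRule.foldl
    (fun best p => if decide (p.2 < best) && PySem.Str.isIn p.1 text then p.2 else best) 9

def generate_fallback_counter_questions_py_alt (user_text : String) : List String :=
  let text := PySem.Str.lower user_text
  let best := pvBestRule text
  if best = 0 then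
    let t := extract_target_alt user_text
    [ "If you truly hated " ++ t ++ ", why haven't you cut them off completely?",
      "Can you think of even one good moment with " ++ t ++ " - does that fit with 'hate'?",
      "Is it actual hate, or disappointment that " ++ t ++ " didn't meet your expectations?" ]
  else
    (PySem.Dict.get? pvRuleQuestions best).getD pvGenericB

-- ===== PRECONDITION & SPEC =====
def Spec_generate_fallback_counter_questions_py (user_text : String) (out : List String) : Prop := out = generate_fallback_counter_questions_py_alt user_text
instance (user_text : String) (out : List String) : Decidable (Spec_generate_fallback_counter_questions_py user_text out) := by unfold Spec_generate_fallback_counter_questions_py; infer_instance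

-- ===== CLAIM (what is proved, stated in full; the proofs are below) =====
def Claim_equal_generate_fallback_counter_questions_py : Prop := ∀ (user_text : String), Dom_generate_fallback_counter_questions_py user_text → Spec_generate_fallback_counter_questions_py user_text (generate_fallback_counter_questions_py user_text)

-- ===== LEMMAS AND PROOFS =====
-- B's single-expression _extract_target agrees with A's five-way chain
theorem extract_target_alt_eq (text : String) :
    extract_target_alt text = extract_target_py text := by
  unfold extract_target_alt extract_target_py
  dsimp only
  simp only [List.any_cons, List.any_nil, Bool.or_false]
  generalize PySem.Str.isIn "friend" (PySem.Str.lower text) = bf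
  generalize PySem.Str.isIn "parent" (PySem.Str.lower text) = bp
  generalize PySem.Str.isIn "mom" (PySem.Str.lower text) = bm
  generalize PySem.Str.isIn "dad" (PySem.Str.lower text) = bd
  generalize PySem.Str.isIn "teacher" (PySem.Str.lower text) = bt
  generalize PySem.Str.isIn "myself" (PySem.Str.lower text) = bs
  generalize PySem.Str.isIn "i " (PySem.Str.lower text) = bi
  cases bf <;> cases bp <;> cases bm <;> cases bd <;> cases bt <;> cases bs <;> cases bi <;> rfl

-- one same-id block of the keyword index folds to a single min update
theorem pvBlockFold (text : String) (kws : List String) (i : Nat) :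
    ∀ acc : Nat,
      List.foldl (fun best p => if decide (p.2 < best) && PySem.Str.isIn p.1 text then p.2 else best)
        acc (kws.map (fun k => (k, i)))
        = if kws.any (fun k => PySem.Str.isIn k text) then min acc i else acc := by
  induction kws with
  | nil => intro acc; simp
  | cons k ks ih =>
    intro acc
    simp only [List.map_cons, List.foldl_cons, List.any_cons, ih]
    rcases Bool.eq_false_or_eq_true (PySem.Str.isIn k text) with h | h <;>
      rcases Bool.eq_false_or_eq_true (ks.any fun k => PySem.Str.isIn k text) with hks | hks <;>
      simp only [h, hks] <;> split_ifs <;> simp_all <;> omega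

-- the keyword index is the concatenation of its nine same-id blocks
theorem pvKeywordRule_blocks :
    pvKeywordRule =
      (["hate", "can't stand", "despise"].map (fun k => (k, 0))) ++
      (["can't", "cannot", "unable", "impossible"].map (fun k => (k, 1))) ++
      (["stressed", "stress", "anxious", "anxiety"].map (fun k => (k, 2))) ++
      (["distracted", "focus", "concentrate"].map (fun k => (k, 3))) ++
      (["lazy", "procrastinat"].map (fun k => (k, 4))) ++
      (["don't understand", "doesn't understand", "no one understands"].map (fun k => (k, 5))) ++
      (["pressure", "expect", "expectation"].map (fun k => (k, 6))) ++
      (["fail", "failing", "failure"].map (fun k => (k, 7))) ++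
      (["friend", "friends"].map (fun k => (k, 8))) := rfl

-- ===== VERDICT (by name: the statement is the Claim_ definition above) =====
set_option maxHeartbeats 1600000 in
theorem generate_fallback_counter_questions_py_spec : Claim_equal_generate_fallback_counter_questions_py := by
  intro user_text _
  unfold Spec_generate_fallback_counter_questions_py
  unfold generate_fallback_counter_questions_py generate_fallback_counter_questions_py_alt pvBestRule
  dsimp only
  rw [extract_target_alt_eq, pvKeywordRule_blocks]
  simp only [List.foldl_append, pvBlockFold]
  generalize (["hate", "can't stand", "despise"].any fun w => PySem.Str.isIn w (PySem.Str.lower user_text)) = c1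
  generalize (["can't", "cannot", "unable", "impossible"].any fun w => PySem.Str.isIn w (PySem.Str.lower user_text)) = c2
  generalize (["stressed", "stress", "anxious", "anxiety"].any fun w => PySem.Str.isIn w (PySem.Str.lower user_text)) = c3
  generalize (["distracted", "focus", "concentrate"].any fun w => PySem.Str.isIn w (PySem.Str.lower user_text)) = c4
  generalize (["lazy", "procrastinat"].any fun w => PySem.Str.isIn w (PySem.Str.lower user_text)) = c5
  generalize (["don't understand", "doesn't understand", "no one understands"].any fun w => PySem.Str.isIn w (PySem.Str.lower user_text)) = c6
  generalize (["pressure", "expect", "expectation"].any fun w => PySem.Str.isIn w (PySem.Str.lower user_text)) = c7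
  generalize (["fail", "failing", "failure"].any fun w => PySem.Str.isIn w (PySem.Str.lower user_text)) = c8
  generalize (["friend", "friends"].any fun w => PySem.Str.isIn w (PySem.Str.lower user_text)) = c9
  cases c1 <;> cases c2 <;> cases c3 <;> cases c4 <;> cases c5 <;> cases c6 <;> cases c7 <;> cases c8 <;> cases c9 <;> rfl
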